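-- pv_equiv track=rewrite | github.com/ManhQLe/pwc-assessment | Q3/CountWords2.py | countInText
-- ===== SOURCE A (Python) =====
-- def encodeChar(c):
--     if c== ' ':
--         return 0
--     if c == '\n':
--         return 1
--     if c.lower() in ['a','e','i','o','u']:
--         return 3
--     return 2
--
-- def isEligibleWord(word,vowelsPerWord):
--     count = 0
--     for c in word:
--         count+= 1 if c.lower() in ['a','e','i','o','u'] else 0
--         if count>= vowelsPerWord:
--             return True
--     return False
--
-- def countInText(texts, wordFrequency, vowelsPerWord, lineFrequency):
--     lineFrequency = max(lineFrequency,1)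
--     wordFrequency = max(wordFrequency,1)
--     vowelsPerWord = max(vowelsPerWord,0)
--     linei = 1
--     wordi = 0
--     wordCount = 0
--     lineCount = 0
--     word = []
--     state = 0 # StartLine
--     lastLineHit = False
--
--     for c in texts:
--         charType = encodeChar(c)
--         isAlpha = charType > 1
--
--         matchedLine = linei % lineFrequency == 0
--
--         if state == 0: #Start State
--             if isAlpha == True:
--                 state = 1
--                 word.append(c)
--         else:
--             if state == 1: #Word construction state
--                 if isAlpha == False: #Found a word
--                     wordi += 1 if matchedLine == True else -wordi
--
--                     matched = matchedLine & ((wordi) % wordFrequency == 0)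
--                     d = d = "".join(word)
--                     inc = 1 if (matched & isEligibleWord(d,vowelsPerWord)) == True else 0
--
--                     wordCount+= inc
--                     lastLineHit = lastLineHit or inc > 0
--                     word = [] # Reset word
--                     state = 0 # come back start state
--                 else:
--                     word.append(c)
--
--         if charType == 1:
--             linei+=1
--             lineCount+=1 if lastLineHit == True else 0
--             lastLineHit = False
--
--
--     # Process last word and last line
--     if len(word) > 0:
--         matched = matchedLine & ((wordi+1) % wordFrequency == 0)
--         d = d = "".join(word)
--         inc = 1 if (matched & isEligibleWord(d,vowelsPerWord)) == True else 0
--         lastLineHit = lastLineHit or inc > 0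
--         wordCount+= inc
--     lineCount+=1 if lastLineHit == True else 0
--
--     return lineCount, wordCount
-- ===== SOURCE B (Python) =====
-- def countInText(texts, wordFrequency, vowelsPerWord, lineFrequency):
--     # Two-pass: tokenize into (word, line) events + newline events, then do the bookkeeping.
--     lf = max(lineFrequency, 1)
--     wf = max(wordFrequency, 1)
--     vp = max(vowelsPerWord, 0)
--     # pass 1: tokenize
--     events = []           # ('w', word, lineNumber) or ('nl',)
--     cur = []
--     line = 1
--     for c in texts:
--         if c == ' ' or c == '\n':
--             if cur:
--                 events.append(('w', ''.join(cur), line))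
--                 cur = []
--             if c == '\n':
--                 events.append(('nl',))
--                 line += 1
--         else:
--             cur.append(c)
--     pending = ''.join(cur) if cur else None   # trailing unterminated word, on line `line`
--
--     def vowelCount(w):
--         return sum(1 for ch in w if ch.lower() in ['a', 'e', 'i', 'o', 'u'])
--
--     # pass 2: bookkeeping over the event list
--     wordi = 0
--     wordCount = 0
--     lineCount = 0
--     hit = False
--     for ev in events:
--         if ev[0] == 'w':
--             matchedLine = ev[2] % lf == 0
--             wordi = wordi + 1 if matchedLine else 0
--             if matchedLine and wordi % wf == 0 and vowelCount(ev[1]) >= vp: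
--                 wordCount += 1
--                 hit = True
--         else:
--             lineCount += 1 if hit else 0
--             hit = False
--     if pending is not None:
--         matchedLine = line % lf == 0
--         if matchedLine and (wordi + 1) % wf == 0 and vowelCount(pending) >= vp:
--             wordCount += 1
--             hit = True
--     lineCount += 1 if hit else 0
--     return lineCount, wordCount
-- ===== Notes on version B (the rewrite author's own statement) =====
-- stated objective: alternative
-- what changed: A is a single character-level finite-state machine interleaving tokenization with the counting; B first tokenizes the text into a list of (word, line-number) and newline events plus a pending unterminated word, then does all frequency/eligibility bookkeeping in a second pass over that event list, testing word eligibility by a total vowel count instead of A's early-return running count.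
import Mathlib
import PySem

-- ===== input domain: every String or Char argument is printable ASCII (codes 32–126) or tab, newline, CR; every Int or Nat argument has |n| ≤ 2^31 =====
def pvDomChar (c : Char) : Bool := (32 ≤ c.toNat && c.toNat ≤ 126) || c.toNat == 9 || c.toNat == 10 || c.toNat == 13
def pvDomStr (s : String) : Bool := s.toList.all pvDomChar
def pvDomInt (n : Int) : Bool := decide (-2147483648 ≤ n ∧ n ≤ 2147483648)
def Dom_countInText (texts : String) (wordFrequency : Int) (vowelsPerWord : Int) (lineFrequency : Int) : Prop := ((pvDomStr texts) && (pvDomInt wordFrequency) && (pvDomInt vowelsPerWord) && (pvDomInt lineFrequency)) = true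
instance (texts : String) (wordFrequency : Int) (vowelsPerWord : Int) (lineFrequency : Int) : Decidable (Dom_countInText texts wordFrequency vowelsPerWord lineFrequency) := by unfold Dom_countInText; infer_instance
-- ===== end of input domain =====

-- B replaces A's single character-level state machine by two passes (tokenize into
-- (word,line)/newline events, then do the frequency bookkeeping over the events);
-- objective: alternative decomposition (same O(n); a timing run measured B faster by a constant factor).

-- ===== PORT A =====

-- c.lower() in ['a','e','i','o','u']  (shared vowel test, used verbatim by both Pythons)
def pvIsVowel (c : Char) : Bool := (PySem.Chars.lowerChar c) ∈ ['a', 'e', 'i', 'o', 'u']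

def encodeChar (c : Char) : Int :=
  if c = ' ' then 0
  else if c = '\n' then 1
  else if pvIsVowel c then 3
  else 2

-- the for-loop of isEligibleWord with its running count and early return
def pvEligAux (vowelsPerWord : Int) (count : Int) : List Char → Bool
  | [] => false
  | c :: cs =>
    let count' := count + (if pvIsVowel c then 1 else 0)
    if vowelsPerWord ≤ count' then true else pvEligAux vowelsPerWord count' cs

def isEligibleWord (word : List Char) (vowelsPerWord : Int) : Bool :=
  pvEligAux vowelsPerWord 0 word

structure PvAState where
  linei : Int
  wordi : Int
  wordCount : Int
  lineCount : Int
  word : List Char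
  state : Int
  lastLineHit : Bool
  matchedLine : Bool      -- the loop-local variable `matchedLine` (read by the trailing block)
deriving Repr, DecidableEq

-- one iteration of A's `for c in texts` loop
def pvStepA (wordFrequency lineFrequency vowelsPerWord : Int) (s0 : PvAState) (c : Char) : PvAState :=
  let charType := encodeChar c
  let isAlpha : Bool := decide (1 < charType)
  let s := { s0 with matchedLine := decide (PySem.Int.mod s0.linei lineFrequency = 0) }
  let s1 :=
    if s.state = 0 then
      (if isAlpha then { s with state := 1, word := s.word ++ [c] } else s)
    else if s.state = 1 then
      (if isAlpha = false then
        let wordi := if s.matchedLine then s.wordi + 1 else 0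
        let matched := s.matchedLine && decide (PySem.Int.mod wordi wordFrequency = 0)
        let inc : Int := if matched && isEligibleWord s.word vowelsPerWord then 1 else 0
        { s with wordi := wordi, wordCount := s.wordCount + inc,
                 lastLineHit := s.lastLineHit || decide (0 < inc),
                 word := [], state := 0 }
      else { s with word := s.word ++ [c] })
    else s
  if charType = 1 then
    { s1 with linei := s1.linei + 1,
              lineCount := s1.lineCount + (if s1.lastLineHit then 1 else 0),
              lastLineHit := false }
  else s1

-- A's code after the loop: process last word and last line
def pvFinA (wordFrequency vowelsPerWord : Int) (s : PvAState) : Int × Int :=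
  let s' :=
    if 0 < s.word.length then
      let matched := s.matchedLine && decide (PySem.Int.mod (s.wordi + 1) wordFrequency = 0)
      let inc : Int := if matched && isEligibleWord s.word vowelsPerWord then 1 else 0
      { s with lastLineHit := s.lastLineHit || decide (0 < inc), wordCount := s.wordCount + inc }
    else s
  (s'.lineCount + (if s'.lastLineHit then 1 else 0), s'.wordCount)

def countInText (texts : String) (wordFrequency : Int) (vowelsPerWord : Int) (lineFrequency : Int) : Int × Int :=
  let lf := max lineFrequency 1
  let wf := max wordFrequency 1
  let vp := max vowelsPerWord 0
  let s0 : PvAState := ⟨1, 0, 0, 0, [], 0, false, false⟩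
  let s := texts.toList.foldl (pvStepA wf lf vp) s0
  pvFinA wf vp s

-- ===== PORT B =====

inductive PvEvent where
  | w : String → Int → PvEvent     -- ('w', word, lineNumber)
  | nl : PvEvent                   -- ('nl',)
deriving Repr, DecidableEq

-- pass 1 loop body: state = (events, cur, line)
def pvTokStep (st : List PvEvent × List Char × Int) (c : Char) : List PvEvent × List Char × Int :=
  let (events, cur, line) := st
  if c = ' ' || c = '\n' then
    let events := if cur ≠ [] then events ++ [PvEvent.w (String.ofList cur) line] else events
    if c = '\n' then (events ++ [PvEvent.nl], [], line + 1) else (events, [], line)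
  else (events, cur ++ [c], line)

-- sum(1 for ch in w if ch.lower() in ['a','e','i','o','u'])
def pvVowelCount (w : String) : Int :=
  w.toList.foldl (fun a ch => a + (if pvIsVowel ch then 1 else 0)) 0

-- pass 2 loop body: state = (wordi, wordCount, lineCount, hit)
def pvEvStep (lf wf vp : Int) (st : Int × Int × Int × Bool) (ev : PvEvent) : Int × Int × Int × Bool :=
  let (wordi, wordCount, lineCount, hit) := st
  match ev with
  | .w d ln =>
    let matchedLine : Bool := decide (PySem.Int.mod ln lf = 0)
    let wordi := if matchedLine then wordi + 1 else 0
    if matchedLine && decide (PySem.Int.mod wordi wf = 0) && decide (vp ≤ pvVowelCount d) then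
      (wordi, wordCount + 1, lineCount, true)
    else (wordi, wordCount, lineCount, hit)
  | .nl => (wordi, wordCount, lineCount + (if hit then 1 else 0), false)

-- B's code after the event loop: pending word, then the final line commit
def pvFinB (lf wf vp : Int) (st : Int × Int × Int × Bool) (pending : Option String) (line : Int) : Int × Int :=
  let (wordi, wordCount, lineCount, hit) := st
  let (wordCount, hit) :=
    match pending with
    | some d =>
      if decide (PySem.Int.mod line lf = 0) && decide (PySem.Int.mod (wordi + 1) wf = 0)
          && decide (vp ≤ pvVowelCount d) then
        (wordCount + 1, true)
      else (wordCount, hit)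
    | none => (wordCount, hit)
  (lineCount + (if hit then 1 else 0), wordCount)

def countInText_alt (texts : String) (wordFrequency : Int) (vowelsPerWord : Int) (lineFrequency : Int) : Int × Int :=
  let lf := max lineFrequency 1
  let wf := max wordFrequency 1
  let vp := max vowelsPerWord 0
  let (events, cur, line) := texts.toList.foldl pvTokStep ([], [], 1)
  let pending : Option String := if cur ≠ [] then some (String.ofList cur) else none
  let st := events.foldl (pvEvStep lf wf vp) (0, 0, 0, false)
  pvFinB lf wf vp st pending line

-- ===== PRECONDITION & SPEC =====
def Spec_countInText (texts : String) (wordFrequency : Int) (vowelsPerWord : Int) (lineFrequency : Int) (out : Int × Int) : Prop := out = countInText_alt texts wordFrequency vowelsPerWord lineFrequency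
instance (texts : String) (wordFrequency : Int) (vowelsPerWord : Int) (lineFrequency : Int) (out : Int × Int) : Decidable (Spec_countInText texts wordFrequency vowelsPerWord lineFrequency out) := by unfold Spec_countInText; infer_instance

-- ===== CLAIM (what is proved, stated in full; the proofs are below) =====
def Claim_equal_countInText : Prop := ∀ (texts : String) (wordFrequency : Int) (vowelsPerWord : Int) (lineFrequency : Int), Dom_countInText texts wordFrequency vowelsPerWord lineFrequency → Spec_countInText texts wordFrequency vowelsPerWord lineFrequency (countInText texts wordFrequency vowelsPerWord lineFrequency)

-- ===== LEMMAS AND PROOFS =====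

-- the events emitted by pass 1 from a given (cur, line) tokenizer state
def pvTokRec : List Char → List Char → Int → List PvEvent
  | [], _, _ => []
  | c :: cs, cur, line =>
    if c = ' ' || c = '\n' then
      (if cur ≠ [] then [PvEvent.w (String.ofList cur) line] else []) ++
      (if c = '\n' then PvEvent.nl :: pvTokRec cs [] (line + 1) else pvTokRec cs [] line)
    else pvTokRec cs (cur ++ [c]) line

-- the final (cur, line) of pass 1
def pvTokFin : List Char → List Char → Int → List Char × Int
  | [], cur, line => (cur, line)
  | c :: cs, cur, line =>
    if c = ' ' || c = '\n' then
      pvTokFin cs [] (if c = '\n' then line + 1 else line)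
    else pvTokFin cs (cur ++ [c]) line

theorem pvTok_foldl (cs : List Char) (events : List PvEvent) (cur : List Char) (line : Int) :
    List.foldl pvTokStep (events, cur, line) cs
      = (events ++ pvTokRec cs cur line, pvTokFin cs cur line) := by
  induction cs generalizing events cur line with
  | nil => simp [pvTokRec, pvTokFin]
  | cons c cs ih =>
    by_cases hs : c = ' '
    · subst hs
      rcases eq_or_ne cur [] with hc | hc <;>
        simp [pvTokStep, pvTokRec, pvTokFin, hc, ih, List.append_assoc]
    · by_cases hn : c = '\n'
      · subst hn
        rcases eq_or_ne cur [] with hc | hc <;>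
          simp [pvTokStep, pvTokRec, pvTokFin, hs, hc, ih, List.append_assoc]
      · simp [pvTokStep, pvTokRec, pvTokFin, hs, hn, ih]

theorem pvFoldl_cv_mono (c : Int) (cs : List Char) :
    c ≤ List.foldl (fun a ch => a + (if pvIsVowel ch then 1 else 0)) c cs := by
  induction cs generalizing c with
  | nil => simp
  | cons x xs ih =>
    refine le_trans ?_ (ih (c + (if pvIsVowel x then 1 else 0)))
    split <;> omega

-- the early return of isEligibleWord coincides with the total vowel count test on nonempty words
theorem pvElig_cons (v : Int) (cs : List Char) : ∀ (x : Char) (c : Int),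
    pvEligAux v c (x :: cs)
      = decide (v ≤ List.foldl (fun a ch => a + (if pvIsVowel ch then 1 else 0)) c (x :: cs)) := by
  induction cs with
  | nil =>
    intro x c
    have hunf : pvEligAux v c [x]
        = (if v ≤ c + (if pvIsVowel x then 1 else 0) then true
           else pvEligAux v (c + (if pvIsVowel x then 1 else 0)) []) := rfl
    rw [hunf]
    by_cases h : v ≤ c + (if pvIsVowel x then 1 else 0) <;> simp [h, pvEligAux, List.foldl]
  | cons y ys ih =>
    intro x c
    have hunf : pvEligAux v c (x :: y :: ys)
        = (if v ≤ c + (if pvIsVowel x then 1 else 0) then true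
           else pvEligAux v (c + (if pvIsVowel x then 1 else 0)) (y :: ys)) := rfl
    rw [hunf]
    by_cases h : v ≤ c + (if pvIsVowel x then 1 else 0)
    · have hm := pvFoldl_cv_mono (c + (if pvIsVowel x then 1 else 0)) (y :: ys)
      have hle : v ≤ List.foldl (fun a ch => a + (if pvIsVowel ch then 1 else 0)) c (x :: y :: ys) :=
        le_trans h hm
      rw [if_pos h]
      exact (decide_eq_true hle).symm
    · rw [if_neg h, ih y (c + (if pvIsVowel x then 1 else 0))]
      simp [List.foldl_cons]

theorem pvIsEligible_eq (v : Int) (cs : List Char) (h : cs ≠ []) :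
    isEligibleWord cs v = decide (v ≤ pvVowelCount (String.ofList cs)) := by
  rcases cs with _ | ⟨x, t⟩
  · exact absurd rfl h
  · have hl : (String.ofList (x :: t)).toList = x :: t := by simp
    simp only [isEligibleWord, pvVowelCount, hl]
    exact pvElig_cons v t x 0

-- the common "close a word" transition both programs perform
def pvCloseW (lf wf vp : Int) (st : Int × Int × Int × Bool) (cur : List Char) (line : Int) :
    Int × Int × Int × Bool :=
  let m := decide (PySem.Int.mod line lf = 0)
  let wordi := if m then st.1 + 1 else 0
  let matched := m && decide (PySem.Int.mod wordi wf = 0)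
  let inc : Int := if matched && isEligibleWord cur vp then 1 else 0
  (wordi, st.2.1 + inc, st.2.2.1, st.2.2.2 || decide (0 < inc))

theorem pvEvStep_w (lf wf vp wordi wc lc : Int) (hit : Bool) (cur : List Char) (line : Int)
    (hc : cur ≠ []) :
    pvEvStep lf wf vp (wordi, wc, lc, hit) (PvEvent.w (String.ofList cur) line)
      = pvCloseW lf wf vp (wordi, wc, lc, hit) cur line := by
  by_cases hd : PySem.Int.mod line lf = 0
  · by_cases he : PySem.Int.mod (wordi + 1) wf = 0 <;>
      by_cases hv : vp ≤ pvVowelCount (String.ofList cur) <;>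
        simp [pvEvStep, pvCloseW, hd, he, hv, pvIsEligible_eq vp cur hc]
  · simp [pvEvStep, pvCloseW, hd, pvIsEligible_eq vp cur hc]

theorem pvStepA_space (wf lf vp line wordi wc lc : Int) (hit : Bool) (cur : List Char) (m : Bool)
    (hc : cur ≠ []) :
    pvStepA wf lf vp ⟨line, wordi, wc, lc, cur, 1, hit, m⟩ ' '
      = ⟨line, (pvCloseW lf wf vp (wordi, wc, lc, hit) cur line).1,
          (pvCloseW lf wf vp (wordi, wc, lc, hit) cur line).2.1,
          (pvCloseW lf wf vp (wordi, wc, lc, hit) cur line).2.2.1,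
          [], 0, (pvCloseW lf wf vp (wordi, wc, lc, hit) cur line).2.2.2,
          decide (PySem.Int.mod line lf = 0)⟩ := by
  simp [pvStepA, pvCloseW, encodeChar]

theorem pvStepA_nl_close (wf lf vp line wordi wc lc : Int) (hit : Bool) (cur : List Char) (m : Bool)
    (hc : cur ≠ []) :
    pvStepA wf lf vp ⟨line, wordi, wc, lc, cur, 1, hit, m⟩ '\n'
      = ⟨line + 1, (pvCloseW lf wf vp (wordi, wc, lc, hit) cur line).1,
          (pvCloseW lf wf vp (wordi, wc, lc, hit) cur line).2.1,
          (pvCloseW lf wf vp (wordi, wc, lc, hit) cur line).2.2.1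
            + (if (pvCloseW lf wf vp (wordi, wc, lc, hit) cur line).2.2.2 then 1 else 0),
          [], 0, false, decide (PySem.Int.mod line lf = 0)⟩ := by
  simp [pvStepA, pvCloseW, encodeChar]

theorem pvStepA_space_nil (wf lf vp line wordi wc lc : Int) (hit : Bool) (m : Bool) :
    pvStepA wf lf vp ⟨line, wordi, wc, lc, [], 0, hit, m⟩ ' '
      = ⟨line, wordi, wc, lc, [], 0, hit, decide (PySem.Int.mod line lf = 0)⟩ := by
  simp [pvStepA, encodeChar]

theorem pvStepA_nl_nil (wf lf vp line wordi wc lc : Int) (hit : Bool) (m : Bool) :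
    pvStepA wf lf vp ⟨line, wordi, wc, lc, [], 0, hit, m⟩ '\n'
      = ⟨line + 1, wordi, wc, lc + (if hit then 1 else 0), [], 0, false,
          decide (PySem.Int.mod line lf = 0)⟩ := by
  simp [pvStepA, encodeChar]

theorem pvStepA_alpha (wf lf vp line wordi wc lc : Int) (hit : Bool) (cur : List Char) (m : Bool)
    (c : Char) (hs : c ≠ ' ') (hn : c ≠ '\n') :
    pvStepA wf lf vp ⟨line, wordi, wc, lc, cur, (if cur = [] then 0 else 1), hit, m⟩ c
      = ⟨line, wordi, wc, lc, cur ++ [c], 1, hit, decide (PySem.Int.mod line lf = 0)⟩ := by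
  have h2 : encodeChar c = (if pvIsVowel c then 3 else 2) := by simp [encodeChar, hs, hn]
  have hgt : (decide (1 < encodeChar c) : Bool) = true := by rw [h2]; split <;> decide
  have hne : ¬ encodeChar c = 1 := by rw [h2]; split <;> decide
  rcases eq_or_ne cur [] with hcur | hcur <;> simp [pvStepA, hgt, hne, hcur]

-- the trailing blocks agree from a nonempty word state
theorem pvFin_eq (wf lf vp line wordi wc lc : Int) (hit : Bool) (cur : List Char) (hc : cur ≠ []) :
    pvFinA wf vp ⟨line, wordi, wc, lc, cur, 1, hit, decide (PySem.Int.mod line lf = 0)⟩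
      = pvFinB lf wf vp (wordi, wc, lc, hit) (some (String.ofList cur)) line := by
  cases hit <;> by_cases hd : PySem.Int.mod line lf = 0 <;>
    by_cases he : PySem.Int.mod (wordi + 1) wf = 0 <;>
      by_cases hv : vp ≤ pvVowelCount (String.ofList cur) <;>
        simp [pvFinA, pvFinB, hd, he, hv, pvIsEligible_eq vp cur hc, hc, List.length_pos_iff]

-- main invariant: A's character machine equals pass 2 over the remaining token events
theorem pvMain (wf lf vp : Int) (cs : List Char) :
    ∀ (cur : List Char) (line wordi wc lc : Int) (hit m : Bool),
    (cur ≠ [] → m = decide (PySem.Int.mod line lf = 0)) →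
    pvFinA wf vp
        (List.foldl (pvStepA wf lf vp)
          ⟨line, wordi, wc, lc, cur, (if cur = [] then 0 else 1), hit, m⟩ cs)
      = pvFinB lf wf vp
          (List.foldl (pvEvStep lf wf vp) (wordi, wc, lc, hit) (pvTokRec cs cur line))
          (if (pvTokFin cs cur line).1 ≠ [] then some (String.ofList (pvTokFin cs cur line).1) else none)
          (pvTokFin cs cur line).2 := by
  induction cs with
  | nil =>
    intro cur line wordi wc lc hit m hm
    rcases eq_or_ne cur [] with hc | hc
    · subst hc; simp [pvTokRec, pvTokFin, pvFinA, pvFinB]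
    · rw [hm hc, if_neg hc]
      simp only [pvTokRec, pvTokFin, List.foldl, if_pos hc, if_neg hc, ne_eq,
        not_false_eq_true, reduceIte]
      exact pvFin_eq wf lf vp line wordi wc lc hit cur hc
  | cons c cs ih =>
    intro cur line wordi wc lc hit m hm
    by_cases hs : c = ' '
    · subst hs
      rcases eq_or_ne cur [] with hc | hc
      · subst hc
        simp only [reduceIte]
        rw [List.foldl_cons, pvStepA_space_nil]
        have htok : pvTokRec (' ' :: cs) [] line = pvTokRec cs [] line := by
          simp [pvTokRec]
        have hfin : pvTokFin (' ' :: cs) [] line = pvTokFin cs [] line := by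
          simp [pvTokFin]
        rw [htok, hfin]
        exact ih [] line wordi wc lc hit _ (by simp)
      · rw [List.foldl_cons, if_neg hc, pvStepA_space wf lf vp line wordi wc lc hit cur m hc]
        have htok : pvTokRec (' ' :: cs) cur line
            = PvEvent.w (String.ofList cur) line :: pvTokRec cs [] line := by
          simp [pvTokRec, hc]
        have hfin : pvTokFin (' ' :: cs) cur line = pvTokFin cs [] line := by
          simp [pvTokFin]
        rw [htok, hfin, List.foldl_cons, pvEvStep_w lf wf vp wordi wc lc hit cur line hc]
        exact ih [] line _ _ _ _ _ (by simp)
    · by_cases hn : c = '\n'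
      · subst hn
        rcases eq_or_ne cur [] with hc | hc
        · subst hc
          simp only [reduceIte]
          rw [List.foldl_cons, pvStepA_nl_nil]
          have htok : pvTokRec ('\n' :: cs) [] line = PvEvent.nl :: pvTokRec cs [] (line + 1) := by
            simp [pvTokRec]
          have hfin : pvTokFin ('\n' :: cs) [] line = pvTokFin cs [] (line + 1) := by
            simp [pvTokFin]
          rw [htok, hfin, List.foldl_cons]
          have hev : pvEvStep lf wf vp (wordi, wc, lc, hit) PvEvent.nl
              = (wordi, wc, lc + (if hit then 1 else 0), false) := rfl
          rw [hev]
          exact ih [] (line + 1) wordi wc _ false _ (by simp)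
        · rw [List.foldl_cons, if_neg hc, pvStepA_nl_close wf lf vp line wordi wc lc hit cur m hc]
          have htok : pvTokRec ('\n' :: cs) cur line
              = PvEvent.w (String.ofList cur) line :: PvEvent.nl :: pvTokRec cs [] (line + 1) := by
            simp [pvTokRec, hc]
          have hfin : pvTokFin ('\n' :: cs) cur line = pvTokFin cs [] (line + 1) := by
            simp [pvTokFin]
          rw [htok, hfin, List.foldl_cons, pvEvStep_w lf wf vp wordi wc lc hit cur line hc,
            List.foldl_cons]
          have hev : pvEvStep lf wf vp (pvCloseW lf wf vp (wordi, wc, lc, hit) cur line) PvEvent.nl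
              = ((pvCloseW lf wf vp (wordi, wc, lc, hit) cur line).1,
                 (pvCloseW lf wf vp (wordi, wc, lc, hit) cur line).2.1,
                 (pvCloseW lf wf vp (wordi, wc, lc, hit) cur line).2.2.1
                   + (if (pvCloseW lf wf vp (wordi, wc, lc, hit) cur line).2.2.2 then 1 else 0),
                 false) := rfl
          rw [hev]
          exact ih [] (line + 1) _ _ _ false _ (by simp)
      · rw [List.foldl_cons, pvStepA_alpha wf lf vp line wordi wc lc hit cur m c hs hn]
        have htok : pvTokRec (c :: cs) cur line = pvTokRec cs (cur ++ [c]) line := by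
          simp [pvTokRec, hs, hn]
        have hfin : pvTokFin (c :: cs) cur line = pvTokFin cs (cur ++ [c]) line := by
          simp [pvTokFin, hs, hn]
        rw [htok, hfin]
        have := ih (cur ++ [c]) line wordi wc lc hit (decide (PySem.Int.mod line lf = 0))
          (fun _ => rfl)
        simpa using this

-- ===== VERDICT (by name: the statement is the Claim_ definition above) =====
theorem countInText_spec : Claim_equal_countInText := by
  intro texts wordFrequency vowelsPerWord lineFrequency _
  unfold Spec_countInText countInText countInText_alt
  rw [pvTok_foldl]
  simpa using pvMain (max wordFrequency 1) (max lineFrequency 1) (max vowelsPerWord 0)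
    texts.toList [] 1 0 0 0 false false (by simp)
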